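-- pv_equiv track=rewrite | github.com/HectorBaiges/Cripto | Practica2/Codi.py | GF_es_generador
-- ===== SOURCE A (Python) =====
-- def GF_product_p(a,b):
--     result = 0
--     for i in range(8):
--         if ((b%2) == 0x01):
--             result = result ^a
--         aux = a << 1
--         if ((aux & 0x100) == 0x100):
--             aux ^= 0x1d
--         a = aux & 0xFF
--         b = b>>1
--
--     return result & 0xff
--
-- def GF_es_generador(a):
--     check = [False] * 256
--     check[0] = True
--     check[a] = True
--     k = 1
--     tmp = a
--     while (tmp != 1):
--         tmp = GF_product_p(tmp, a)
--         check[tmp] = True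
--         k = k + 1
--     return (k==255)
-- ===== SOURCE B (Python) =====
-- def GF_product_p(a, b):
--     result = 0
--     for i in range(8):
--         if ((b % 2) == 0x01):
--             result = result ^ a
--         aux = a << 1
--         if ((aux & 0x100) == 0x100):
--             aux ^= 0x1d
--         a = aux & 0xFF
--         b = b >> 1
--     return result & 0xff
--
-- def GF_pow(a, e):
--     # square-and-multiply exponentiation in GF(256)
--     r = 1
--     while e != 0:
--         if e & 1:
--             r = GF_product_p(r, a)
--         a = GF_product_p(a, a)
--         e >>= 1
--     return r
--
-- def GF_es_generador(a):
--     # a generates the 255-element multiplicative group iff its order is not a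
--     # proper divisor of 255 = 3 * 5 * 17, i.e. a^(255/p) != 1 for p = 3, 5, 17
--     return GF_pow(a, 85) != 1 and GF_pow(a, 51) != 1 and GF_pow(a, 15) != 1
-- ===== Notes on version B (the rewrite author's own statement) =====
-- stated objective: faster
-- what changed: Replaced the orbit walk that multiplies by a up to 254 times and counts the cycle length with three square-and-multiply exponentiations testing a^85, a^51, a^15 != 1 (255 = 3*5*17 order criterion).
import Mathlib
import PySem

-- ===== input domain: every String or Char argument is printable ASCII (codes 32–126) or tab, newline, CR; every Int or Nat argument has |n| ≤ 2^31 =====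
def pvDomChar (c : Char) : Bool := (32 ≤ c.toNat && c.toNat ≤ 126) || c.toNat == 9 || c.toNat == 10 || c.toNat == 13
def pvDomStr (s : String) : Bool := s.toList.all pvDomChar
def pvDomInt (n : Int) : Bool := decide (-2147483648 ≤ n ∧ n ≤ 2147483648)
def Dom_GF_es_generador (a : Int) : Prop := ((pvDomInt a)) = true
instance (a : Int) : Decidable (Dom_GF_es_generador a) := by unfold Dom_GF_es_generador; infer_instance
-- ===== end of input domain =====

-- B replaces A's orbit walk (one field multiplication per orbit element, counting
-- the cycle length) with three square-and-multiply exponentiations: a generates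
-- the group iff a^85 ≠ 1, a^51 ≠ 1 and a^15 ≠ 1 (255 = 3·5·17).

-- ===== PORT A =====
-- helper GF_product_p: the for-loop over range(8); state (result, a, b), one
-- recursive call per iteration, the final 'return result & 0xff' at i = 0
def prodLoop : Nat → Int → Int → Int → Int
  | 0, result, _, _ => PySem.Int.band result 0xff
  | i + 1, result, a, b =>
    let result := if PySem.Int.mod b 2 == 1 then PySem.Int.bxor result a else result
    let aux := a <<< (1 : Nat)
    let aux := if PySem.Int.band aux 0x100 == 0x100 then PySem.Int.bxor aux 0x1d else aux
    prodLoop i result (PySem.Int.band aux 0xFF) (b >>> (1 : Nat))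

def GF_product_p (a b : Int) : Int := prodLoop 8 0 a b

-- A's while loop, fuel-bounded: on every input of Pre_ the loop stops after at
-- most 254 iterations (the orbit reaches 1), so fuel 512 is never exhausted.
-- (The Python also fills a 'check' list that never affects the result; omitted.)
def gfAWalk (fuel : Nat) (a tmp k : Int) : Int :=
  match fuel with
  | 0 => k
  | f + 1 =>
    if tmp == 1 then k
    else gfAWalk f a (GF_product_p tmp a) (k + 1)

def GF_es_generador (a : Int) : Bool :=
  decide (gfAWalk 512 a a 1 = 255)

-- ===== PORT B =====
-- Source B's GF_pow while loop (square-and-multiply), fuel-bounded: e halves each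
-- iteration and e ≤ 85 on every call, so fuel 64 is never exhausted.
def gfPowLoop (fuel : Nat) (r a e : Int) : Int :=
  match fuel with
  | 0 => r
  | f + 1 =>
    if e == 0 then r
    else
      let r := if PySem.Int.band e 1 != 0 then GF_product_p r a else r
      gfPowLoop f r (GF_product_p a a) (e >>> (1 : Nat))

def GF_pow (a e : Int) : Int := gfPowLoop 64 1 a e

def GF_es_generador_alt (a : Int) : Bool :=
  GF_pow a 85 != 1 && GF_pow a 51 != 1 && GF_pow a 15 != 1

-- ===== PRECONDITION & SPEC =====
-- Pre_ excludes exactly the inputs on which the Python A does not return: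
-- a = 0 and a = -256 (tmp never reaches 1, the while loop runs forever) and all
-- other a outside [-256, 255] (check[a] raises IndexError). A returns on all of
-- [-255, -1] ∪ [1, 255] — negative a works via Python's negative list indexing
-- and two's-complement bit operations — and all those inputs are admitted.
def Pre_GF_es_generador (a : Int) : Prop :=
  (1 ≤ a ∧ a ≤ 255) ∨ (-255 ≤ a ∧ a ≤ -1)
instance (a : Int) : Decidable (Pre_GF_es_generador a) := by
  unfold Pre_GF_es_generador; infer_instance

def pvWitness_GF_es_generador : Int := (3)

def Spec_GF_es_generador (a : Int) (out : Bool) : Prop := out = GF_es_generador_alt a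
instance (a : Int) (out : Bool) : Decidable (Spec_GF_es_generador a out) := by
  unfold Spec_GF_es_generador; infer_instance

-- ===== CLAIM (what is proved, stated in full; the proofs are below) =====
def Claim_equal_GF_es_generador : Prop :=
  ∀ (a : Int), Dom_GF_es_generador a → Pre_GF_es_generador a →
    Spec_GF_es_generador a (GF_es_generador a)

-- ===== LEMMAS AND PROOFS =====
-- A = B on the positive field elements 1..255, by evaluation.
set_option maxRecDepth 8192 in
set_option maxHeartbeats 16000000 in
theorem gf_key_pos : ∀ n : Nat, n < 255 →
    GF_es_generador ((n + 1 : Nat) : Int) = GF_es_generador_alt ((n + 1 : Nat) : Int) := by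
  decide

-- the one input whose A-walk shape differs from its positive representative's
set_option maxRecDepth 8192 in
set_option maxHeartbeats 4000000 in
theorem gf_neg255 : GF_es_generador (-255) = GF_es_generador_alt (-255) := by
  decide

theorem gf_shr1 (b : Int) : b >>> (1 : Nat) = b / 2 := by
  have := Int.shiftRight_eq_div_pow b 1
  simpa using this

theorem gf_modb (b : Int) : PySem.Int.mod b 2 = b % 2 :=
  PySem.Int.mod_eq_emod_of_pos (by norm_num)

-- the loop of GF_product_p reads its b argument only through i parity bits
theorem prodLoop_b_congr : ∀ (i : Nat) (x a b b' : Int),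
    (2 ^ i : Int) ∣ (b - b') → prodLoop i x a b = prodLoop i x a b' := by
  intro i
  induction i with
  | zero => intro x a b b' _; rfl
  | succ n ih =>
    intro x a b b' hdvd
    obtain ⟨c, hc⟩ := hdvd
    have ht : b = b' + 2 * (2 ^ n * c) := by
      have : (2 : Int) ^ (n + 1) * c = 2 * (2 ^ n * c) := by ring
      omega
    have hmod : PySem.Int.mod b 2 = PySem.Int.mod b' 2 := by
      rw [gf_modb, gf_modb]; omega
    have hshift : (2 ^ n : Int) ∣ (b >>> (1 : Nat) - b' >>> (1 : Nat)) := by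
      rw [gf_shr1, gf_shr1]
      exact ⟨c, by omega⟩
    simp only [prodLoop, hmod]
    rw [ih _ _ _ _ hshift]

theorem prod_b_shift (t m : Int) : GF_product_p t (m - 256) = GF_product_p t m :=
  prodLoop_b_congr 8 0 t (m - 256) m ⟨-1, by ring⟩

-- GF_product_p (m-256) (m-256) = GF_product_p m m, by evaluation on 1..255
set_option maxRecDepth 8192 in
set_option maxHeartbeats 4000000 in
theorem gf_first : ∀ n : Nat, n < 255 →
    GF_product_p (((n + 1 : Nat) : Int) - 256) ((n + 1 : Nat) : Int) =
      GF_product_p ((n + 1 : Nat) : Int) ((n + 1 : Nat) : Int) := by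
  decide

theorem gfAWalk_step (f : Nat) (a tmp k : Int) (h : tmp ≠ 1) :
    gfAWalk (f + 1) a tmp k = gfAWalk f a (GF_product_p tmp a) (k + 1) := by
  have hb : (tmp == 1) = false := by simpa using h
  simp [gfAWalk, hb]

theorem walk_a_congr (m : Int) : ∀ (f : Nat) (tmp k : Int),
    gfAWalk f (m - 256) tmp k = gfAWalk f m tmp k := by
  intro f
  induction f with
  | zero => intro tmp k; rfl
  | succ n ih =>
    intro tmp k
    by_cases h : tmp = 1
    · simp [gfAWalk, h]
    · have hb : (tmp == 1) = false := by simpa using h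
      simp only [gfAWalk, hb, Bool.false_eq_true, if_false]
      rw [prod_b_shift tmp m, ih]

theorem gf_shift_A (m : Int) (h2 : 2 ≤ m) (h255 : m ≤ 255)
    (hL2 : GF_product_p (m - 256) (m - 256) = GF_product_p m m) :
    GF_es_generador (m - 256) = GF_es_generador m := by
  unfold GF_es_generador
  have hne1 : m - 256 ≠ 1 := by omega
  have hne2 : m ≠ 1 := by omega
  have hstep1 : gfAWalk 512 (m - 256) (m - 256) 1 =
      gfAWalk 511 (m - 256) (GF_product_p (m - 256) (m - 256)) 2 :=
    gfAWalk_step 511 (m - 256) (m - 256) 1 hne1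
  have hstep2 : gfAWalk 512 m m 1 = gfAWalk 511 m (GF_product_p m m) 2 :=
    gfAWalk_step 511 m m 1 hne2
  rw [hstep1, hstep2, hL2, walk_a_congr m 511]

theorem gfPowLoop_step (f : Nat) (r a e : Int) (h : e ≠ 0) :
    gfPowLoop (f + 1) r a e =
      gfPowLoop f (if PySem.Int.band e 1 != 0 then GF_product_p r a else r)
        (GF_product_p a a) (e >>> (1 : Nat)) := by
  have hb : (e == 0) = false := by simpa using h
  simp [gfPowLoop, hb]

theorem pow_shift (m : Int)
    (hL2 : GF_product_p (m - 256) (m - 256) = GF_product_p m m) (e : Int) :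
    GF_pow (m - 256) e = GF_pow m e := by
  unfold GF_pow
  by_cases he : e = 0
  · subst he; simp [gfPowLoop]
  · have h1 : gfPowLoop 64 1 (m - 256) e =
        gfPowLoop 63 (if PySem.Int.band e 1 != 0 then GF_product_p 1 (m - 256) else 1)
          (GF_product_p (m - 256) (m - 256)) (e >>> (1 : Nat)) :=
      gfPowLoop_step 63 1 (m - 256) e he
    have h2 : gfPowLoop 64 1 m e =
        gfPowLoop 63 (if PySem.Int.band e 1 != 0 then GF_product_p 1 m else 1)
          (GF_product_p m m) (e >>> (1 : Nat)) :=
      gfPowLoop_step 63 1 m e he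
    rw [h1, h2, prod_b_shift 1 m, hL2]

theorem gf_shift_B (m : Int)
    (hL2 : GF_product_p (m - 256) (m - 256) = GF_product_p m m) :
    GF_es_generador_alt (m - 256) = GF_es_generador_alt m := by
  unfold GF_es_generador_alt
  rw [pow_shift m hL2 85, pow_shift m hL2 51, pow_shift m hL2 15]

-- ===== VERDICT (by name: the statement is the Claim_ definition above) =====
theorem GF_es_generador_spec : Claim_equal_GF_es_generador := by
  intro a _ hpre
  unfold Spec_GF_es_generador
  rcases hpre with ⟨h1, h2⟩ | ⟨h1, h2⟩
  · obtain ⟨n, hn, ha⟩ : ∃ n : Nat, n < 255 ∧ a = ((n + 1 : Nat) : Int) :=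
      ⟨a.toNat - 1, by omega, by omega⟩
    rw [ha]; exact gf_key_pos n hn
  · -- a = m - 256 for the positive representative m = a + 256 ∈ [1, 255]
    by_cases hm1 : a = -255
    · rw [hm1]; exact gf_neg255
    · obtain ⟨n, hn, hm⟩ : ∃ n : Nat, n < 255 ∧ a + 256 = ((n + 1 : Nat) : Int) :=
        ⟨(a + 256).toNat - 1, by omega, by omega⟩
      have hL2 : GF_product_p (a + 256 - 256) (a + 256 - 256) =
          GF_product_p (a + 256) (a + 256) := by
        rw [prod_b_shift (a + 256 - 256) (a + 256), hm]
        exact gf_first n hn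
      have ha : a = a + 256 - 256 := by omega
      calc GF_es_generador a
          = GF_es_generador (a + 256 - 256) := by rw [← ha]
        _ = GF_es_generador (a + 256) := gf_shift_A (a + 256) (by omega) (by omega) hL2
        _ = GF_es_generador_alt (a + 256) := by rw [hm]; exact gf_key_pos n hn
        _ = GF_es_generador_alt (a + 256 - 256) := (gf_shift_B (a + 256) hL2).symm
        _ = GF_es_generador_alt a := by rw [← ha]
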